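-- pv_equiv track=rewrite | github.com/TToH4uK/Algorithm_FAMCS | Graph algorithms/Tree?/solution.py | is_tree
-- ===== SOURCE A (Python) =====
-- def is_tree(n, adjacency_matrix):
--     visited = [False] * n
--     stack = [0]
--     visited[0] = True
--
--     while stack:
--         current_vertex = stack.pop()
--         for neighbor in range(n):
--             if adjacency_matrix[current_vertex][neighbor] == 1 and not visited[neighbor]:
--                 stack.append(neighbor)
--                 visited[neighbor] = True
--
--     if False in visited:
--         return "No"
--
--     edges_count = sum(sum(row) for row in adjacency_matrix) // 2
--     if edges_count != n - 1:
--         return "No"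
--
--     return "Yes"
-- ===== SOURCE B (Python) =====
-- def is_tree(n, adjacency_matrix):
--     visited = [False] * n
--     visited[0] = True
--     while True:
--         new = [visited[j] or any(visited[v] and adjacency_matrix[v][j] == 1
--                                  for v in range(n))
--                for j in range(n)]
--         if new == visited:
--             break
--         visited = new
--     if not all(visited):
--         return "No"
--     edges = sum(map(sum, adjacency_matrix)) // 2
--     return "Yes" if edges == n - 1 else "No"
-- ===== Notes on version B (the rewrite author's own statement) =====
-- stated objective: alternative
-- what changed: Replaces the explicit-stack DFS with a round-based fixpoint iteration (repeatedly expand the visited vector by one full adjacency sweep until it stops changing); Pre_ excludes n < 1 and matrices with fewer than n rows or rows shorter than n, on which A generally raises IndexError (on ragged inputs whose short rows are unreachable A still returns and B agrees).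
-- outside the precondition, e.g. on is_tree(2, [[0, 0], [1]]): A returns 'No', B returns 'No'
import Mathlib
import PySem

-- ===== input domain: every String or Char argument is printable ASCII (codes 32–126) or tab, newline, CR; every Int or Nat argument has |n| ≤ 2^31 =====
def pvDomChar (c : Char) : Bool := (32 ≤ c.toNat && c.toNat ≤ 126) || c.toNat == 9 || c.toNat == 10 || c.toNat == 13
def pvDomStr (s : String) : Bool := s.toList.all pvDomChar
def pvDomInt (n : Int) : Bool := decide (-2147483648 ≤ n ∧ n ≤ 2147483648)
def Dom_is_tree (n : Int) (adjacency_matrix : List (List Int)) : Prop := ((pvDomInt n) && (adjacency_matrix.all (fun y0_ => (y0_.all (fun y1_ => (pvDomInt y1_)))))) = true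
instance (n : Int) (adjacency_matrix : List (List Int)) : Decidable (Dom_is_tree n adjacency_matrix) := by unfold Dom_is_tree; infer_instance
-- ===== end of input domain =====

-- B replaces A's explicit-stack DFS by a fixpoint iteration of one-step adjacency expansion until
-- the visited vector stops changing; the edge-count test is the same sum//2 == n-1.


-- ===== PORT A =====
-- Python's stack has its top at the RIGHT end (append/pop); here the stack list is kept top-first,
-- so Python's append is cons and Python's pop takes the head. Indexing is totalized with defaults
-- (visited reads default to `true`, matrix reads to 0); under Pre_ every index Python evaluates is
-- in range, so the defaults never fire. The while loop is run on a fuel counter, a pure totality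
-- guard: fuel 2*n+1 provably exceeds the loop's iteration count (pvFoldMu below), so the fuel-0
-- arm is never reached.

-- body of the `for neighbor in range(n)` loop
def aStep (m : List (List Int)) (cur : Int) (s : List Bool × List Int) (j : Int) :
    List Bool × List Int :=
  if (PySem.List.pyGetD (PySem.List.pyGetD m cur []) j 0 == 1) && !(PySem.List.pyGetD s.1 j true)
  then (s.1.set j.toNat true, j :: s.2)
  else s

-- `while stack:` — pop the head, fold the inner for-loop over range(n)
def aLoopF (m : List (List Int)) (n : Int) : Nat → List Bool → List Int → List Bool
  | _, v, [] => v
  | 0, v, _ :: _ => v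
  | fuel + 1, v, cur :: rest =>
      let s := (PySem.List.pyRange 0 n 1).foldl (aStep m cur) (v, rest)
      aLoopF m n fuel s.1 s.2

def is_tree (n : Int) (adjacency_matrix : List (List Int)) : String :=
  let visited := (List.replicate n.toNat false).set 0 true
  let visited := aLoopF adjacency_matrix n (2 * n.toNat + 1) visited [0]
  if false ∈ visited then "No"
  else
    let edges_count :=
      PySem.Int.floordiv (adjacency_matrix.foldl (fun acc row => acc + row.sum) 0) 2
    if edges_count ≠ n - 1 then "No" else "Yes"

-- ===== PORT B =====
-- new = [visited[j] or any(visited[v] and adjacency_matrix[v][j] == 1 for v in range(n)) for j in range(n)]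
def bExpand (n : Int) (m : List (List Int)) (visited : List Bool) : List Bool :=
  (PySem.List.pyRange 0 n 1).map (fun j =>
    PySem.List.pyGetD visited j false ||
      (PySem.List.pyRange 0 n 1).any (fun v =>
        PySem.List.pyGetD visited v false &&
          (PySem.List.pyGetD (PySem.List.pyGetD m v []) j 0 == 1)))

-- `while True: new = …; if new == visited: break; visited = new` — fuel n+1 exceeds the round
-- count (each non-final round marks a new vertex; pvCountFalseLt below), so fuel 0 is never hit
def bLoopF (n : Int) (m : List (List Int)) : Nat → List Bool → List Bool
  | 0, v => v
  | fuel + 1, v =>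
      let nv := bExpand n m v
      if nv = v then v else bLoopF n m fuel nv

def is_tree_alt (n : Int) (adjacency_matrix : List (List Int)) : String :=
  let visited := (List.replicate n.toNat false).set 0 true
  let visited := bLoopF n adjacency_matrix (n.toNat + 1) visited
  if !(visited.all (fun b => b)) then "No"
  else
    let edges := PySem.Int.floordiv ((adjacency_matrix.map List.sum).sum) 2
    if edges = n - 1 then "Yes" else "No"

-- ===== PRECONDITION & SPEC =====
-- Pre_ excludes n < 1 (visited[0] = True raises IndexError) and matrices with fewer than n rows or a
-- row shorter than n, on which A's traversal generally raises IndexError; on ragged inputs whose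
-- short rows happen to be unreachable A still returns and B agrees there.
def Pre_is_tree (n : Int) (adjacency_matrix : List (List Int)) : Prop :=
  1 ≤ n ∧ n.toNat ≤ adjacency_matrix.length ∧ ∀ r ∈ adjacency_matrix, n.toNat ≤ r.length
instance (n : Int) (adjacency_matrix : List (List Int)) : Decidable (Pre_is_tree n adjacency_matrix) := by
  unfold Pre_is_tree; infer_instance

def pvWitness_is_tree : Int × List (List Int) := (2, [[0, 1], [1, 0]])

def Spec_is_tree (n : Int) (adjacency_matrix : List (List Int)) (out : String) : Prop := out = is_tree_alt n adjacency_matrix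
instance (n : Int) (adjacency_matrix : List (List Int)) (out : String) : Decidable (Spec_is_tree n adjacency_matrix out) := by unfold Spec_is_tree; infer_instance

-- ===== CLAIM (what is proved, stated in full; the proofs are below) =====
def Claim_equal_is_tree : Prop := ∀ (n : Int) (adjacency_matrix : List (List Int)), Dom_is_tree n adjacency_matrix → Pre_is_tree n adjacency_matrix → Spec_is_tree n adjacency_matrix (is_tree n adjacency_matrix)

-- ===== LEMMAS AND PROOFS =====
-- Python indexing with a non-negative index is plain getD (used by the ports' termination lemmas)
lemma pvPyGetD_nonneg {α : Type} (xs : List α) (j : Int) (d : α) (hj : 0 ≤ j) :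
    PySem.List.pyGetD xs j d = xs.getD j.toNat d := by
  simp only [PySem.List.pyGetD, PySem.List.pyGet?, List.getD_eq_getElem?_getD,
    PySem.List.pyIdx?]
  split_ifs with h1 <;> simp_all

lemma pvCountFalseSet (v : List Bool) (a : Nat) (ha : a < v.length) (hv : v[a] = false) :
    (v.set a true).count false + 1 = v.count false := by
  induction v generalizing a with
  | nil => simp at ha
  | cons x xs ih =>
      cases a with
      | zero => simp_all
      | succ a' =>
          simp only [List.set_cons_succ, List.count_cons]
          have := ih a' (by simpa using ha) (by simpa using hv)
          omega

lemma pvGetDFalse (xs : List Bool) (k : Nat) (h : xs.getD k true = false) :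
    k < xs.length ∧ xs.getD k false = false := by
  rcases Nat.lt_or_ge k xs.length with h'|h'
  · exact ⟨h', by simpa [List.getD_eq_getElem?_getD, List.getElem?_eq_getElem h'] using h⟩
  · exfalso; simp [List.getD_eq_getElem?_getD, List.getElem?_eq_none h'] at h

lemma pvGetDFalseElem (xs : List Bool) (k : Nat) (hk : k < xs.length) :
    xs.getD k false = xs[k] := by
  simp [List.getD_eq_getElem?_getD, List.getElem?_eq_getElem hk]

-- fuel adequacy for A's while loop: each fold step keeps 2*(#unvisited) + |stack| non-increasing
lemma pvAStepMu (m : List (List Int)) (cur : Int) (s : List Bool × List Int) (j : Int)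
    (hj : 0 ≤ j) :
    2 * (aStep m cur s j).1.count false + (aStep m cur s j).2.length ≤
      2 * s.1.count false + s.2.length := by
  unfold aStep
  split_ifs with h
  · have h2 : PySem.List.pyGetD s.1 j true = false := by
      rcases Bool.and_eq_true .. |>.mp h with ⟨-, h2⟩
      simpa using h2
    rw [pvPyGetD_nonneg _ _ _ hj] at h2
    obtain ⟨hlt, helem⟩ := pvGetDFalse _ _ h2
    have := pvCountFalseSet s.1 j.toNat hlt (by rw [← pvGetDFalseElem _ _ hlt]; exact helem)
    simp only [List.length_cons]
    omega
  · exact le_refl _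

lemma pvFoldMu (m : List (List Int)) (cur : Int) (js : List Int) (hjs : ∀ j ∈ js, 0 ≤ j)
    (s : List Bool × List Int) :
    2 * (js.foldl (aStep m cur) s).1.count false + (js.foldl (aStep m cur) s).2.length ≤
      2 * s.1.count false + s.2.length := by
  induction js generalizing s with
  | nil => simp
  | cons j js ih =>
      simp only [List.foldl_cons]
      exact le_trans (ih (fun x hx => hjs x (List.mem_cons_of_mem _ hx)) _)
        (pvAStepMu m cur s j (hjs j (List.mem_cons_self)))

lemma pvBExpandLength (n : Int) (m : List (List Int)) (v : List Bool) :
    (bExpand n m v).length = n.toNat := by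
  simp [bExpand, PySem.List.length_pyRange_one]

lemma pvBExpandElem (n : Int) (m : List (List Int)) (v : List Bool) (j : Nat)
    (hj : j < n.toNat) :
    (bExpand n m v)[j]'(by rw [pvBExpandLength]; exact hj) =
      (v.getD j false ||
        (PySem.List.pyRange 0 n 1).any (fun x =>
          PySem.List.pyGetD v x false &&
            (PySem.List.pyGetD (PySem.List.pyGetD m x []) j 0 == 1))) := by
  simp only [bExpand, List.getElem_map]
  rw [PySem.List.getElem_pyRange_one]
  simp [pvPyGetD_nonneg]

lemma pvBExpandMono (n : Int) (m : List (List Int)) (v : List Bool)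
    (hv : v.length = n.toNat) (j : Nat) (hj : j < n.toNat) (h : v[j]'(by omega) = true) :
    (bExpand n m v)[j]'(by rw [pvBExpandLength]; exact hj) = true := by
  rw [pvBExpandElem n m v j hj, pvGetDFalseElem v j (by omega), h, Bool.true_or]

lemma pvCountFalseLe (v w : List Bool) (hl : w.length = v.length)
    (hmono : ∀ j (hj : j < v.length), v[j] = true → w[j]'(by omega) = true) :
    w.count false ≤ v.count false := by
  induction v generalizing w with
  | nil => simp_all [List.length_eq_zero_iff.mp hl]
  | cons a v' ih =>
      match w, hl with
      | b :: w', hl =>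
        have hm0 := hmono 0 (by simp)
        have ht := ih w' (by simpa using hl)
          (fun j hj h => by simpa using hmono (j+1) (by simpa using hj) (by simpa using h))
        simp only [List.getElem_cons_zero] at hm0
        cases a with
        | true =>
            rw [hm0 rfl]
            simp
            omega
        | false =>
            cases b <;> simp <;> omega

lemma pvCountFalseLt (v w : List Bool) (hl : w.length = v.length)
    (hmono : ∀ j (hj : j < v.length), v[j] = true → w[j]'(by omega) = true)
    (hne : w ≠ v) : w.count false < v.count false := by
  induction v generalizing w with
  | nil => exact absurd (List.length_eq_zero_iff.mp hl) (by simp_all)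
  | cons a v' ih =>
      match w, hl with
      | b :: w', hl =>
        have hm0 := hmono 0 (by simp)
        have hmt : ∀ j (hj : j < v'.length), v'[j] = true → w'[j]'(by simp at hl; omega) = true :=
          fun j hj h => by simpa using hmono (j+1) (by simpa using hj) (by simpa using h)
        have hle := pvCountFalseLe v' w' (by simpa using hl) hmt
        simp only [List.getElem_cons_zero] at hm0
        by_cases hab : b = a
        · subst hab
          have hnet : w' ≠ v' := fun h => hne (by rw [h])
          have := ih w' (by simpa using hl) hmt hnet
          cases b <;> simp <;> omega
        · cases a with
          | true => exact absurd (hm0 rfl) (by simp_all)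
          | false =>
              cases b
              · exact absurd rfl hab
              · simp
                omega

-- matrix entry and visited-mark as both ports totalize them, and reachability from vertex 0
-- through entries = 1 staying below N: both loops mark exactly the PvReach-able vertices.
def pvMat (m : List (List Int)) (i j : Nat) : Int := (m.getD i []).getD j 0

def pvMark (v : List Bool) (i : Nat) : Bool := v.getD i false

inductive PvReach (m : List (List Int)) (N : Nat) : Nat → Prop
  | zero : PvReach m N 0
  | step {i j : Nat} : PvReach m N i → j < N → pvMat m i j = 1 → PvReach m N j

def aStepN (m : List (List Int)) (c : Nat) (s : List Bool × List Int) (k : Nat) :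
    List Bool × List Int :=
  if pvMat m c k = 1 ∧ s.1.getD k true = false then (s.1.set k true, (k : Int) :: s.2) else s

lemma pvAStepCast (m : List (List Int)) (cur : Int) (s : List Bool × List Int) (k : Nat)
    (hcur : 0 ≤ cur) :
    aStep m cur s ((0:Int) + (k:Int)) = aStepN m cur.toNat s k := by
  simp only [zero_add]
  simp only [aStep, aStepN, pvMat, pvPyGetD_nonneg _ _ _ hcur,
    pvPyGetD_nonneg _ (k:Int) _ (Int.natCast_nonneg k), Int.toNat_natCast,
    Bool.and_eq_true, beq_iff_eq, Bool.not_eq_true']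
  split_ifs with h1 <;> simp_all

lemma pvFoldBridge (m : List (List Int)) (n cur : Int) (hcur : 0 ≤ cur)
    (s : List Bool × List Int) :
    (PySem.List.pyRange 0 n 1).foldl (aStep m cur) s =
      (List.range n.toNat).foldl (aStepN m cur.toNat) s := by
  rw [PySem.List.pyRange_one, List.foldl_map]
  simp only [sub_zero]
  induction (List.range n.toNat) generalizing s with
  | nil => rfl
  | cons k ks ih => simp only [List.foldl_cons, pvAStepCast m cur s k hcur, ih]

lemma pvMark_lt (v : List Bool) (i : Nat) (h : pvMark v i = true) : i < v.length := by
  by_contra h'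
  simp [pvMark, List.getD_eq_getElem?_getD, List.getElem?_eq_none (by omega : v.length ≤ i)] at h

lemma pvMark_set (v : List Bool) (a i : Nat) (ha : a < v.length) :
    pvMark (v.set a true) i = ((i == a) || pvMark v i) := by
  by_cases hi : i < v.length
  · simp only [pvMark, List.getD_eq_getElem?_getD, List.getElem?_set]
    by_cases hia : a = i <;> simp_all
    exact fun h => absurd h (fun hh => hia hh.symm)
  · have h1 : pvMark (v.set a true) i = false := by
      by_contra h
      have := pvMark_lt _ _ (by simpa using h)
      simp at this; omega
    have hmv : pvMark v i = false := by
      by_contra h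
      have := pvMark_lt _ _ (by simpa using h)
      omega
    have hia : (i == a) = false := by simp; omega
    rw [h1, hmv, hia]
    simp

lemma pvMarkGetDTrue (v : List Bool) (k : Nat) (hk : k < v.length) :
    v.getD k true = pvMark v k := by
  simp [pvMark, List.getD_eq_getElem?_getD, List.getElem?_eq_getElem hk]

lemma pvFoldInv (m : List (List Int)) (N : Nat) (c : Nat) (js : List Nat)
    (hjs : ∀ j ∈ js, j < N) (v : List Bool) (st : List Int)
    (hlen : v.length = N)
    (hst : ∀ x ∈ st, 0 ≤ x ∧ x.toNat < N ∧ pvMark v x.toNat = true) :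
    (js.foldl (aStepN m c) (v, st)).1.length = N ∧
    (∀ x ∈ st, x ∈ (js.foldl (aStepN m c) (v, st)).2) ∧
    (∀ x ∈ (js.foldl (aStepN m c) (v, st)).2,
        0 ≤ x ∧ x.toNat < N ∧ pvMark (js.foldl (aStepN m c) (v, st)).1 x.toNat = true) ∧
    (∀ i, pvMark v i = true → pvMark (js.foldl (aStepN m c) (v, st)).1 i = true) ∧
    (∀ i, pvMark (js.foldl (aStepN m c) (v, st)).1 i = true →
        pvMark v i = true ∨ (i : Int) ∈ (js.foldl (aStepN m c) (v, st)).2) ∧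
    (∀ i, pvMark (js.foldl (aStepN m c) (v, st)).1 i = true →
        pvMark v i = true ∨ (i ∈ js ∧ pvMat m c i = 1)) ∧
    (∀ j ∈ js, pvMat m c j = 1 → pvMark (js.foldl (aStepN m c) (v, st)).1 j = true) := by
  induction js generalizing v st with
  | nil =>
      simp only [List.foldl_nil]
      exact ⟨hlen, fun x hx => hx, hst, fun i h => h, fun i h => Or.inl h,
        fun i h => Or.inl h, fun j hj => absurd hj (List.not_mem_nil)⟩
  | cons j js ih =>
      have hjN : j < N := hjs j List.mem_cons_self
      simp only [List.foldl_cons]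
      unfold aStepN
      split_ifs with hg
      · -- newly marked j, pushed
        obtain ⟨hg1, hg2⟩ := hg
        have hjlen : j < v.length := by omega
        have hmvj : pvMark v j = false := (pvGetDFalse v j hg2).2
        have hlen' : (v.set j true).length = N := by simpa using hlen
        have hst' : ∀ x ∈ ((j : Int) :: st),
            0 ≤ x ∧ x.toNat < N ∧ pvMark (v.set j true) x.toNat = true := by
          intro x hx
          rcases List.mem_cons.mp hx with rfl | hx
          · exact ⟨Int.natCast_nonneg j, by simpa using hjN,
              by rw [pvMark_set _ _ _ hjlen]; simp⟩
          · obtain ⟨h1, h2, h3⟩ := hst x hx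
            exact ⟨h1, h2, by rw [pvMark_set _ _ _ hjlen, h3, Bool.or_true]⟩
        obtain ⟨c1, c2, c3, c4, c5, c6, c7⟩ :=
          ih (fun x hx => hjs x (List.mem_cons_of_mem _ hx)) (v.set j true) ((j : Int) :: st)
            hlen' hst'
        refine ⟨c1, fun x hx => c2 x (List.mem_cons_of_mem _ hx), c3, ?_, ?_, ?_, ?_⟩
        · intro i hi
          exact c4 i (by rw [pvMark_set _ _ _ hjlen, hi, Bool.or_true])
        · intro i hi
          rcases c5 i hi with hm | hm
          · rw [pvMark_set _ _ _ hjlen] at hm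
            rcases Bool.or_eq_true .. |>.mp hm with he | hm
            · have : i = j := by simpa using he
              subst this
              exact Or.inr (c2 _ List.mem_cons_self)
            · exact Or.inl hm
          · exact Or.inr hm
        · intro i hi
          rcases c6 i hi with hm | hm
          · rw [pvMark_set _ _ _ hjlen] at hm
            rcases Bool.or_eq_true .. |>.mp hm with he | hm
            · have : i = j := by simpa using he
              subst this
              exact Or.inr ⟨List.mem_cons_self, hg1⟩
            · exact Or.inl hm
          · exact Or.inr ⟨List.mem_cons_of_mem _ hm.1, hm.2⟩
        · intro x hx hmat
          rcases List.mem_cons.mp hx with rfl | hx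
          · exact c4 x (by rw [pvMark_set _ _ _ hjlen]; simp)
          · exact c7 x hx hmat
      · -- j already marked (or no edge)
        obtain ⟨c1, c2, c3, c4, c5, c6, c7⟩ :=
          ih (fun x hx => hjs x (List.mem_cons_of_mem _ hx)) v st hlen hst
        refine ⟨c1, c2, c3, c4, c5, ?_, ?_⟩
        · intro i hi
          rcases c6 i hi with hm | hm
          · exact Or.inl hm
          · exact Or.inr ⟨List.mem_cons_of_mem _ hm.1, hm.2⟩
        · intro x hx hmat
          rcases List.mem_cons.mp hx with rfl | hx
          · -- guard failed but edge exists: x was already marked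
            have hgd : v.getD x true = true := by
              by_contra h
              exact hg ⟨hmat, by simpa using h⟩
            have hmv : pvMark v x = true := by
              rw [← pvMarkGetDTrue v x (by omega)]; exact hgd
            exact c4 x hmv
          · exact c7 x hx hmat

def pvInvA (m : List (List Int)) (N : Nat) (v : List Bool) (st : List Int) : Prop :=
  v.length = N ∧
  (∀ x ∈ st, 0 ≤ x ∧ x.toNat < N ∧ pvMark v x.toNat = true) ∧
  (∀ i, pvMark v i = true → PvReach m N i) ∧
  (∀ i, pvMark v i = true →
      (i : Int) ∈ st ∨ ∀ j, j < N → pvMat m i j = 1 → pvMark v j = true)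

lemma pvALoopChar (m : List (List Int)) (n : Int) (fuel : Nat) (v : List Bool) (st : List Int)
    (h : pvInvA m n.toNat v st) (hf : 2 * v.count false + st.length ≤ fuel) :
    (aLoopF m n fuel v st).length = n.toNat ∧
    (∀ i, pvMark v i = true → pvMark (aLoopF m n fuel v st) i = true) ∧
    (∀ i, pvMark (aLoopF m n fuel v st) i = true → PvReach m n.toNat i) ∧
    (∀ i j, pvMark (aLoopF m n fuel v st) i = true → j < n.toNat → pvMat m i j = 1 →
        pvMark (aLoopF m n fuel v st) j = true) := by
  induction fuel generalizing v st with
  | zero =>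
      have hst : st = [] := List.eq_nil_of_length_eq_zero (by omega)
      subst hst
      have key : aLoopF m n 0 v [] = v := rfl
      rw [key]
      obtain ⟨h1, h2, h3, h4⟩ := h
      exact ⟨h1, fun i hi => hi, h3, fun i j hi hj hmat => by
        rcases h4 i hi with hin | hcl
        · exact absurd hin (List.not_mem_nil)
        · exact hcl j hj hmat⟩
  | succ f ih =>
      cases st with
      | nil =>
          have key : aLoopF m n (f + 1) v [] = v := rfl
          rw [key]
          obtain ⟨h1, h2, h3, h4⟩ := h
          exact ⟨h1, fun i hi => hi, h3, fun i j hi hj hmat => by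
            rcases h4 i hi with hin | hcl
            · exact absurd hin (List.not_mem_nil)
            · exact hcl j hj hmat⟩
      | cons cur rest =>
          obtain ⟨h1, h2, h3, h4⟩ := h
          obtain ⟨hc0, hc1, hc2⟩ := h2 cur List.mem_cons_self
          set s := (PySem.List.pyRange 0 n 1).foldl (aStep m cur) (v, rest) with hs
          have key : aLoopF m n (f + 1) v (cur :: rest) = aLoopF m n f s.1 s.2 := rfl
          rw [key]
          have hmu := pvFoldMu m cur (PySem.List.pyRange 0 n 1)
            (fun j hj => ((PySem.List.mem_pyRange_one).1 hj).1) (v, rest)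
          rw [← hs] at hmu
          have hsuff : 2 * s.1.count false + s.2.length ≤ f := by
            simp only [List.length_cons] at hf
            simp only at hmu
            omega
          have hbridge : s = (List.range n.toNat).foldl (aStepN m cur.toNat) (v, rest) := by
            rw [hs]; exact pvFoldBridge m n cur hc0 (v, rest)
          obtain ⟨c1, c2, c3, c4, c5, c6, c7⟩ :=
            pvFoldInv m n.toNat cur.toNat (List.range n.toNat)
              (fun j hj => List.mem_range.mp hj) v rest h1
              (fun x hx => h2 x (List.mem_cons_of_mem _ hx))
          rw [← hbridge] at c1 c2 c3 c4 c5 c6 c7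
          have hreach_cur : PvReach m n.toNat cur.toNat := h3 _ hc2
          have hinv : pvInvA m n.toNat s.1 s.2 := by
            refine ⟨c1, c3, ?_, ?_⟩
            · intro i hi
              rcases c6 i hi with hm | ⟨hmem, hmat⟩
              · exact h3 i hm
              · exact PvReach.step hreach_cur (List.mem_range.mp hmem) hmat
            · intro i hi
              rcases c5 i hi with hm | hm
              · rcases h4 i hm with hin | hcl
                · rcases List.mem_cons.mp hin with heq | hin
                  · have : i = cur.toNat := by omega
                    subst this
                    exact Or.inr (fun j hj hmat => c7 j (List.mem_range.mpr hj) hmat)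
                  · exact Or.inl (c2 _ hin)
                · exact Or.inr (fun j hj hmat => c4 j (hcl j hj hmat))
              · exact Or.inl hm
          obtain ⟨i1, i2, i3, i4⟩ := ih s.1 s.2 hinv hsuff
          exact ⟨i1, fun i hi => i2 i (c4 i hi), i3, i4⟩

lemma pvAnyCongr {α : Type} (l : List α) (p q : α → Bool) (h : ∀ a ∈ l, p a = q a) :
    l.any p = l.any q := by
  induction l with
  | nil => rfl
  | cons a l ih => simp only [List.any_cons, h a List.mem_cons_self,
      ih (fun x hx => h x (List.mem_cons_of_mem _ hx))]

lemma pvBExpandMark (n : Int) (m : List (List Int)) (v : List Bool) (j : Nat)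
    (hj : j < n.toNat) :
    pvMark (bExpand n m v) j =
      (pvMark v j ||
        (List.range n.toNat).any (fun i => pvMark v i && (pvMat m i j == 1))) := by
  have hlen : j < (bExpand n m v).length := by rw [pvBExpandLength]; exact hj
  rw [pvMark, pvGetDFalseElem _ _ hlen, pvBExpandElem n m v j hj]
  rw [PySem.List.pyRange_one, List.any_map]
  simp only [sub_zero]
  congr 1
  apply pvAnyCongr
  intro x hx
  simp only [Function.comp_apply, zero_add,
    pvPyGetD_nonneg _ _ _ (Int.natCast_nonneg x), Int.toNat_natCast, pvMark, pvMat,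
    pvPyGetD_nonneg _ (j:Int) _ (Int.natCast_nonneg j)]

def pvInvB (m : List (List Int)) (N : Nat) (v : List Bool) : Prop :=
  v.length = N ∧ (∀ i, pvMark v i = true → PvReach m N i)

lemma pvBLoopChar (n : Int) (m : List (List Int)) (fuel : Nat) (v : List Bool)
    (h : pvInvB m n.toNat v) (hf : v.count false < fuel) :
    (bLoopF n m fuel v).length = n.toNat ∧
    (∀ i, pvMark v i = true → pvMark (bLoopF n m fuel v) i = true) ∧
    (∀ i, pvMark (bLoopF n m fuel v) i = true → PvReach m n.toNat i) ∧
    bExpand n m (bLoopF n m fuel v) = bLoopF n m fuel v := by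
  induction fuel generalizing v with
  | zero => omega
  | succ f ih =>
      obtain ⟨h1, h2⟩ := h
      by_cases hfix : bExpand n m v = v
      · have key : bLoopF n m (f + 1) v = v := by
          simp only [bLoopF, hfix, if_pos]
        rw [key]
        exact ⟨h1, fun i hi => hi, h2, hfix⟩
      · have key : bLoopF n m (f + 1) v = bLoopF n m f (bExpand n m v) := by
          simp only [bLoopF, hfix, if_false]
        rw [key]
        have hinv : pvInvB m n.toNat (bExpand n m v) := by
          refine ⟨pvBExpandLength n m v, ?_⟩
          intro i hi
          have hiN : i < n.toNat := by
            have := pvMark_lt _ _ hi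
            rwa [pvBExpandLength] at this
          rw [pvBExpandMark n m v i hiN] at hi
          rcases Bool.or_eq_true .. |>.mp hi with hm | hany
          · exact h2 i hm
          · obtain ⟨x, hx, hpx⟩ := List.any_eq_true.mp hany
            obtain ⟨hmx, hmat⟩ := Bool.and_eq_true .. |>.mp hpx
            exact PvReach.step (h2 x hmx) hiN (by simpa using hmat)
        have hcnt : (bExpand n m v).count false < v.count false :=
          pvCountFalseLt v (bExpand n m v) (by rw [pvBExpandLength, h1])
            (fun j hj hjt => pvBExpandMono n m v h1 j (by omega) hjt) hfix
        obtain ⟨i1, i2, i3, i4⟩ := ih (bExpand n m v) hinv (by omega)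
        refine ⟨i1, ?_, i3, i4⟩
        intro i hi
        have hiN : i < n.toNat := by
          have := pvMark_lt _ _ hi
          omega
        exact i2 i (by rw [pvBExpandMark n m v i hiN, hi, Bool.true_or])

lemma pvFixClosed (n : Int) (m : List (List Int)) (r : List Bool)
    (hfix : bExpand n m r = r) (hlen : r.length = n.toNat) :
    ∀ i j, pvMark r i = true → j < n.toNat → pvMat m i j = 1 → pvMark r j = true := by
  intro i j hi hj hmat
  have hiN : i < n.toNat := by have := pvMark_lt _ _ hi; omega
  have : pvMark (bExpand n m r) j = true := by
    rw [pvBExpandMark n m r j hj]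
    have hany : (List.range n.toNat).any (fun x => pvMark r x && (pvMat m x j == 1)) = true :=
      List.any_eq_true.mpr ⟨i, List.mem_range.mpr hiN, by rw [hi]; simpa using hmat⟩
    rw [hany, Bool.or_true]
  rwa [hfix] at this

lemma pvMarkInit (N : Nat) (i : Nat) (hN : 0 < N) :
    pvMark ((List.replicate N false).set 0 true) i = true ↔ i = 0 := by
  rw [pvMark_set _ _ _ (by simpa using hN)]
  constructor
  · intro h
    rcases Bool.or_eq_true .. |>.mp h with he | hm
    · simpa using he
    · exfalso
      have hlt := pvMark_lt _ _ hm
      simp only [List.length_replicate] at hlt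
      simp [pvMark, List.getD_eq_getElem?_getD, hlt] at hm
  · rintro rfl; simp

lemma pvVisitedEq (n : Int) (m : List (List Int)) (hn : 1 ≤ n) :
    aLoopF m n (2 * n.toNat + 1) ((List.replicate n.toNat false).set 0 true) [0] =
      bLoopF n m (n.toNat + 1) ((List.replicate n.toNat false).set 0 true) := by
  have hN : 0 < n.toNat := by omega
  set v0 := (List.replicate n.toNat false).set 0 true with hv0
  have hlen0 : v0.length = n.toNat := by simp [hv0]
  have hcv : v0.count false ≤ n.toNat := le_trans List.count_le_length (le_of_eq hlen0)
  have hm0 : pvMark v0 0 = true := (pvMarkInit n.toNat 0 hN).mpr rfl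
  have hsound0 : ∀ i, pvMark v0 i = true → PvReach m n.toNat i := by
    intro i hi
    rw [pvMarkInit n.toNat i hN] at hi
    subst hi; exact PvReach.zero
  obtain ⟨a1, a2, a3, a4⟩ := pvALoopChar m n (2 * n.toNat + 1) v0 [0]
    ⟨hlen0,
     fun x hx => by
       rcases List.mem_cons.mp hx with rfl | h
       · exact ⟨le_refl 0, by simpa using hN, by simpa using hm0⟩
       · exact absurd h (List.not_mem_nil),
     hsound0,
     fun i hi => Or.inl (by rw [(pvMarkInit n.toNat i hN).mp hi]; exact List.mem_cons_self)⟩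
    (by simp only [List.length_cons, List.length_nil]; omega)
  obtain ⟨b1, b2, b3, b4⟩ := pvBLoopChar n m (n.toNat + 1) v0 ⟨hlen0, hsound0⟩ (by omega)
  set rA := aLoopF m n (2 * n.toNat + 1) v0 [0]
  set rB := bLoopF n m (n.toNat + 1) v0
  have hAiff : ∀ i, pvMark rA i = true ↔ PvReach m n.toNat i := by
    intro i
    refine ⟨a3 i, ?_⟩
    intro hr
    induction hr with
    | zero => exact a2 0 hm0
    | step h1 h2 h3 ih => exact a4 _ _ ih h2 h3
  have hBclosed := pvFixClosed n m rB b4 b1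
  have hBiff : ∀ i, pvMark rB i = true ↔ PvReach m n.toNat i := by
    intro i
    refine ⟨b3 i, ?_⟩
    intro hr
    induction hr with
    | zero => exact b2 0 hm0
    | step h1 h2 h3 ih => exact hBclosed _ _ ih h2 h3
  apply List.ext_getElem (by rw [a1, b1])
  intro i h1 h2
  have hmA : pvMark rA i = rA[i] := by rw [pvMark, pvGetDFalseElem _ _ h1]
  have hmB : pvMark rB i = rB[i] := by rw [pvMark, pvGetDFalseElem _ _ h2]
  have : pvMark rA i = pvMark rB i := by
    have hA := hAiff i
    have hB := hBiff i
    cases hcA : pvMark rA i <;> cases hcB : pvMark rB i <;> simp_all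
  rw [← hmA, ← hmB, this]

lemma pvSumBridge (m : List (List Int)) (init : Int) :
    m.foldl (fun acc row => acc + row.sum) init = init + (m.map List.sum).sum := by
  induction m generalizing init with
  | nil => simp
  | cons r m ih => simp [List.foldl_cons, ih]; ring

lemma pvMemAll (r : List Bool) : (false ∈ r) ↔ ¬((r.all (fun b => b)) = true) := by
  constructor
  · intro h hall
    rw [List.all_eq_true] at hall
    have := hall false h
    simp at this
  · intro h
    by_contra hmem
    apply h
    rw [List.all_eq_true]
    intro b hb
    cases b
    · exact absurd hb hmem
    · rfl

theorem pvMain (n : Int) (m : List (List Int)) (hn : 1 ≤ n) :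
    is_tree n m = is_tree_alt n m := by
  simp only [is_tree, is_tree_alt]
  rw [pvVisitedEq n m hn]
  set r := bLoopF n m (n.toNat + 1) ((List.replicate n.toNat false).set 0 true)
  have hsum : m.foldl (fun acc row => acc + row.sum) 0 = (m.map List.sum).sum := by
    rw [pvSumBridge]; ring
  by_cases hmem : false ∈ r
  · have hall : (r.all (fun b => b)) = false :=
      Bool.not_eq_true _ |>.mp ((pvMemAll r).mp hmem)
    simp [hmem, hall]
  · have hall : (r.all (fun b => b)) = true := by
      by_contra h
      exact hmem ((pvMemAll r).mpr h)
    simp only [if_neg hmem, hall, Bool.not_true, Bool.false_eq_true, if_false]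
    rw [hsum]
    by_cases hq : PySem.Int.floordiv ((m.map List.sum).sum) 2 = n - 1
    · rw [if_neg (by simpa using hq), if_pos hq]
    · rw [if_pos hq, if_neg hq]

-- ===== VERDICT (by name: the statement is the Claim_ definition above) =====
theorem is_tree_spec : Claim_equal_is_tree := by
  intro n adjacency_matrix _dom hpre
  show is_tree n adjacency_matrix = is_tree_alt n adjacency_matrix
  exact pvMain n adjacency_matrix hpre.1
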